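-- pv_equiv track=rewrite | github.com/hrishikeshtak/Coding_Practises_Solutions | hackerrank/si/bob-and-subarray-or.py | subarray_OR_sum
-- ===== SOURCE A (Python) =====
-- def subarray_OR_sum(arr, n):
--     ans = 0
--     for bit in range(0, 32):
--         c = 0
--         for i in range(0, n):
--             if (arr[i] >> bit) & 1:
--                 ans += (n - i) * (1 << bit) * (c + 1)
--                 c = 0
--             else:
--                 c += 1
--     return ans
-- ===== SOURCE B (Python) =====
-- def subarray_OR_sum(arr, n):
--     if n <= 0:
--         return 0
--     total = n * (n + 1) // 2
--     ans = 0
--     for bit in range(0, 32):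
--         zero_sub = 0
--         run = 0
--         for i in range(0, n):
--             if (arr[i] >> bit) & 1:
--                 zero_sub += run * (run + 1) // 2
--                 run = 0
--             else:
--                 run += 1
--         zero_sub += run * (run + 1) // 2
--         ans += (total - zero_sub) * (1 << bit)
--     return ans
-- ===== Notes on version B (the rewrite author's own statement) =====
-- stated objective: alternative
-- what changed: Per bit, B counts subarrays containing that bit by complement: the closed-form total n*(n+1)//2 minus the triangle number of each maximal zero-run, instead of A's leftmost-set-bit accumulation of (n-i)*(c+1) terms.
import Mathlib
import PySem

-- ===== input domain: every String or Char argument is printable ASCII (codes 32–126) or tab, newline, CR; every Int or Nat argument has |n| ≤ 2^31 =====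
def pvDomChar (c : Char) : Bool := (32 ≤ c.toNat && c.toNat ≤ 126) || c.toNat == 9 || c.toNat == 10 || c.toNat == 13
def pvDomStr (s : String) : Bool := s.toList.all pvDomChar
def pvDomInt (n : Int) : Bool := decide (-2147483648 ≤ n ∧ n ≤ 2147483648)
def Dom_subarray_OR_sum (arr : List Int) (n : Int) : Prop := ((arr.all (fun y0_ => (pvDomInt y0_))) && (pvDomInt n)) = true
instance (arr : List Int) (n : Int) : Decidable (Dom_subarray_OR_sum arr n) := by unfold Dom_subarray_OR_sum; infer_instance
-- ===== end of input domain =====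

-- B replaces A's leftmost-set-bit accumulation by complement counting: per bit,
-- count = n*(n+1)//2 minus triangle numbers of the maximal zero-runs (objective: alternative).

-- ===== PORT A =====
def subarray_OR_sum (arr : List Int) (n : Int) : Int :=
  ((PySem.List.pyRange 0 32 1).foldl (fun ans bit =>
    ((PySem.List.pyRange 0 n 1).foldl (fun (s : Int × Int) i =>
        if PySem.Int.band ((PySem.List.pyGetD arr i 0) >>> bit.toNat) 1 ≠ 0 then
          (s.1 + (n - i) * ((1 : Int) <<< bit.toNat) * (s.2 + 1), 0)
        else
          (s.1, s.2 + 1)) (ans, 0)).1) 0)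

-- ===== PORT B =====
def subarray_OR_sum_alt (arr : List Int) (n : Int) : Int :=
  if n ≤ 0 then 0 else
  let total := PySem.Int.floordiv (n * (n + 1)) 2
  ((PySem.List.pyRange 0 32 1).foldl (fun ans bit =>
    let s := ((PySem.List.pyRange 0 n 1).foldl (fun (s : Int × Int) i =>
        if PySem.Int.band ((PySem.List.pyGetD arr i 0) >>> bit.toNat) 1 ≠ 0 then
          (s.1 + PySem.Int.floordiv (s.2 * (s.2 + 1)) 2, 0)
        else
          (s.1, s.2 + 1)) ((0 : Int), (0 : Int)))
    let zero_sub := s.1 + PySem.Int.floordiv (s.2 * (s.2 + 1)) 2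
    ans + (total - zero_sub) * ((1 : Int) <<< bit.toNat)) 0)

-- ===== PRECONDITION & SPEC =====
-- Pre_ excludes exactly the inputs with n > len(arr), on which A raises IndexError.
def Pre_subarray_OR_sum (arr : List Int) (n : Int) : Prop := n ≤ (arr.length : Int)
instance (arr : List Int) (n : Int) : Decidable (Pre_subarray_OR_sum arr n) := by unfold Pre_subarray_OR_sum; infer_instance
def pvWitness_subarray_OR_sum : List Int × Int := ([1, 2, 3], 3)

def Spec_subarray_OR_sum (arr : List Int) (n : Int) (out : Int) : Prop := out = subarray_OR_sum_alt arr n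
instance (arr : List Int) (n : Int) (out : Int) : Decidable (Spec_subarray_OR_sum arr n out) := by unfold Spec_subarray_OR_sum; infer_instance

-- ===== CLAIM (what is proved, stated in full; the proofs are below) =====
def Claim_equal_subarray_OR_sum : Prop := ∀ (arr : List Int) (n : Int), Dom_subarray_OR_sum arr n → Pre_subarray_OR_sum arr n → Spec_subarray_OR_sum arr n (subarray_OR_sum arr n)

-- ===== LEMMAS AND PROOFS =====

-- triangle number via Python floor division
def pvT (x : Int) : Int := PySem.Int.floordiv (x * (x + 1)) 2

-- list-level recursion mirroring A's inner loop contribution (K factored out)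
def pvFA (p : Int → Prop) [DecidablePred p] : List Int → Int → Int
  | [], _ => 0
  | x :: t, c => if p x then ((t.length : Int) + 1) * (c + 1) + pvFA p t 0 else pvFA p t (c + 1)

-- list-level recursion mirroring B's inner loop zero-run sum, including the final flush
def pvFB (p : Int → Prop) [DecidablePred p] : List Int → Int → Int
  | [], c => pvT c
  | x :: t, c => if p x then pvT c + pvFB p t 0 else pvFB p t (c + 1)

theorem pvT2 (x : Int) : 2 * pvT x = x * (x + 1) := by
  have hdvd : (2 : Int) ∣ x * (x + 1) := (Int.even_mul_succ_self x).two_dvd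
  have hmod : PySem.Int.mod (x * (x + 1)) 2 = 0 :=
    (PySem.Int.mod_eq_zero_iff_dvd (x * (x + 1)) 2).mpr hdvd
  have h := PySem.Int.floordiv_mul_add_mod (x * (x + 1)) 2
  rw [hmod] at h
  unfold pvT
  linarith

theorem pvT_split (c m : Int) : pvT (c + m) = pvT c + pvT (m - 1) + m * (c + 1) := by
  have h1 := pvT2 (c + m)
  have h2 := pvT2 c
  have h3 := pvT2 (m - 1)
  nlinarith [h1, h2, h3]

-- key identity: A's leftmost-set count plus B's zero-run count is the total count
theorem pvFA_add_pvFB (p : Int → Prop) [DecidablePred p] :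
    ∀ (xs : List Int) (c : Int), pvFA p xs c + pvFB p xs c = pvT (c + xs.length) := by
  intro xs
  induction xs with
  | nil => intro c; simp [pvFA, pvFB]
  | cons x t ih =>
    intro c
    by_cases hp : p x
    · simp only [pvFA, pvFB, if_pos hp]
      have := ih 0
      have hs : pvT (c + (↑t.length + 1)) = pvT c + pvT ((↑t.length + 1) - 1) + (↑t.length + 1) * (c + 1) :=
        pvT_split c ((t.length : Int) + 1)
      simp only [List.length_cons]
      push_cast
      ring_nf at this hs ⊢
      linarith
    · simp only [pvFA, pvFB, if_neg hp]
      have := ih (c + 1)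
      simp only [List.length_cons]
      push_cast
      ring_nf at this ⊢
      linarith

-- A's inner fold over pyRange a n computes pvFA on the remaining suffix
theorem pvFoldA (arr : List Int) (p : Int → Prop) [DecidablePred p] (K n : Int) :
    ∀ (xs : List Int) (a : Int), 0 ≤ a → a + xs.length = n → xs <+: arr.drop a.toNat →
    ∀ ans c : Int,
      ((PySem.List.pyRange a n 1).foldl (fun (s : Int × Int) i =>
          if p (PySem.List.pyGetD arr i 0) then (s.1 + (n - i) * K * (s.2 + 1), 0)
          else (s.1, s.2 + 1)) (ans, c)).1 = ans + K * pvFA p xs c := by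
  intro xs
  induction xs with
  | nil =>
    intro a _ hlen _ ans c
    rw [PySem.List.pyRange_one_eq_nil (by simp at hlen; omega)]
    simp [pvFA]
  | cons x t ih =>
    intro a ha hlen hpre ans c
    have hlt : a < n := by
      have h := hlen
      simp only [List.length_cons] at h
      push_cast at h
      omega
    obtain ⟨r, hr⟩ := hpre
    have hdl : arr.drop a.toNat = x :: (t ++ r) := by rw [← hr]; simp
    have hlen_arr : a.toNat < arr.length := by
      have := congrArg List.length hdl
      simp [List.length_drop] at this; omega
    have hget : PySem.List.pyGetD arr a 0 = x := by
      rw [PySem.List.pyGetD_eq_getElem arr 0 ha (by omega)]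
      have h0 : (arr.drop a.toNat)[0]'(by rw [hdl]; simp) = x := by
        simp [hdl]
      rw [List.getElem_drop] at h0
      simpa using h0
    have hpre' : t <+: arr.drop (a + 1).toNat := by
      refine ⟨r, ?_⟩
      have h1 : (a + 1).toNat = a.toNat + 1 := by omega
      rw [h1, ← List.drop_drop, hdl]
      simp
    rw [PySem.List.pyRange_one_cons hlt]
    simp only [List.foldl_cons, hget]
    by_cases hp : p x
    · rw [if_pos hp, ih (a + 1) (by omega) (by simp only [List.length_cons] at hlen; push_cast at hlen ⊢; omega) hpre']
      have hna : n - a = (t.length : Int) + 1 := by simp only [List.length_cons] at hlen; push_cast at hlen; omega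
      simp only [pvFA, if_pos hp, hna]
      ring
    · rw [if_neg hp, ih (a + 1) (by omega) (by simp only [List.length_cons] at hlen; push_cast at hlen ⊢; omega) hpre']
      simp only [pvFA, if_neg hp]

-- B's inner fold over pyRange a n computes the zero-run sum pvFB (minus nothing; final flush included)
theorem pvFoldB (arr : List Int) (p : Int → Prop) [DecidablePred p] (n : Int) :
    ∀ (xs : List Int) (a : Int), 0 ≤ a → a + xs.length = n → xs <+: arr.drop a.toNat →
    ∀ ans c : Int,
      (let s := ((PySem.List.pyRange a n 1).foldl (fun (s : Int × Int) i =>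
          if p (PySem.List.pyGetD arr i 0) then (s.1 + PySem.Int.floordiv (s.2 * (s.2 + 1)) 2, 0)
          else (s.1, s.2 + 1)) (ans, c))
       s.1 + PySem.Int.floordiv (s.2 * (s.2 + 1)) 2) = ans + pvFB p xs c := by
  intro xs
  induction xs with
  | nil =>
    intro a _ hlen _ ans c
    rw [PySem.List.pyRange_one_eq_nil (by simp at hlen; omega)]
    simp [pvFB, pvT]
  | cons x t ih =>
    intro a ha hlen hpre ans c
    have hlt : a < n := by
      have h := hlen
      simp only [List.length_cons] at h
      push_cast at h
      omega
    obtain ⟨r, hr⟩ := hpre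
    have hdl : arr.drop a.toNat = x :: (t ++ r) := by rw [← hr]; simp
    have hlen_arr : a.toNat < arr.length := by
      have := congrArg List.length hdl
      simp [List.length_drop] at this; omega
    have hget : PySem.List.pyGetD arr a 0 = x := by
      rw [PySem.List.pyGetD_eq_getElem arr 0 ha (by omega)]
      have h0 : (arr.drop a.toNat)[0]'(by rw [hdl]; simp) = x := by
        simp [hdl]
      rw [List.getElem_drop] at h0
      simpa using h0
    have hpre' : t <+: arr.drop (a + 1).toNat := by
      refine ⟨r, ?_⟩
      have h1 : (a + 1).toNat = a.toNat + 1 := by omega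
      rw [h1, ← List.drop_drop, hdl]
      simp
    rw [PySem.List.pyRange_one_cons hlt]
    simp only [List.foldl_cons, hget]
    by_cases hp : p x
    · rw [if_pos hp]
      have := ih (a + 1) (by omega) (by simp only [List.length_cons] at hlen; push_cast at hlen ⊢; omega) hpre' (ans + PySem.Int.floordiv (c * (c + 1)) 2) 0
      simp only at this ⊢
      rw [this]
      simp only [pvFB, if_pos hp, pvT]
      ring
    · rw [if_neg hp]
      have := ih (a + 1) (by omega) (by simp only [List.length_cons] at hlen; push_cast at hlen ⊢; omega) hpre' ans (c + 1)
      simp only at this ⊢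
      rw [this]
      simp only [pvFB, if_neg hp]

theorem pvFoldl_const (l : List Int) (i : Int) : l.foldl (fun a (_ : Int) => a) i = i := by
  induction l generalizing i with
  | nil => rfl
  | cons x t ih => exact ih i

theorem pvFoldl_ext (f g : Int → Int → Int) (h : ∀ a b, f a b = g a b)
    (l : List Int) (i : Int) : l.foldl f i = l.foldl g i := by
  induction l generalizing i with
  | nil => rfl
  | cons x t ih => simp only [List.foldl_cons, h, ih]

-- ===== VERDICT (by name: the statement is the Claim_ definition above) =====
theorem subarray_OR_sum_spec : Claim_equal_subarray_OR_sum := by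
  intro arr n _ hpre
  unfold Spec_subarray_OR_sum
  unfold Pre_subarray_OR_sum at hpre
  by_cases hn : n ≤ 0
  · simp only [subarray_OR_sum, subarray_OR_sum_alt, if_pos hn,
      PySem.List.pyRange_one_eq_nil hn, List.foldl_nil]
    exact pvFoldl_const _ 0
  · rw [not_le] at hn
    simp only [subarray_OR_sum, subarray_OR_sum_alt, if_neg (not_le.mpr hn)]
    have hm : ((n.toNat : Int)) = n := Int.toNat_of_nonneg (le_of_lt hn)
    have hmlen : n.toNat ≤ arr.length := by omega
    have hxs_len : (arr.take n.toNat).length = n.toNat := by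
      simp [List.length_take, hmlen]
    have hpref : arr.take n.toNat <+: arr.drop (0 : Int).toNat := by
      simpa using List.take_prefix n.toNat arr
    refine pvFoldl_ext _ _ ?_ _ 0
    intro ans bit
    have hA := pvFoldA arr (fun v => PySem.Int.band (v >>> (bit.toNat : Int)) 1 ≠ 0)
      ((1 : Int) <<< (bit.toNat : Int)) n (arr.take n.toNat) 0 le_rfl
      (by rw [hxs_len]; simpa using hm) hpref ans 0
    have hB := pvFoldB arr (fun v => PySem.Int.band (v >>> (bit.toNat : Int)) 1 ≠ 0)
      n (arr.take n.toNat) 0 le_rfl (by rw [hxs_len]; simpa using hm) hpref 0 0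
    have hkey := pvFA_add_pvFB (fun v => PySem.Int.band (v >>> (bit.toNat : Int)) 1 ≠ 0)
      (arr.take n.toNat) 0
    rw [hxs_len] at hkey
    simp only at hA hB ⊢
    rw [hA, hB]
    simp only [zero_add, hm] at hkey ⊢
    have hT : pvT n = PySem.Int.floordiv (n * (n + 1)) 2 := rfl
    rw [← hT]
    have hFA : pvFA (fun v => PySem.Int.band (v >>> (bit.toNat : Int)) 1 ≠ 0) (arr.take n.toNat) 0
        = pvT n - pvFB (fun v => PySem.Int.band (v >>> (bit.toNat : Int)) 1 ≠ 0) (arr.take n.toNat) 0 := by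
      linarith
    rw [hFA]
    ring
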